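-- pv_equiv track=rewrite | github.com/mei28/Competitive-programing | ARC-160/B.py | solve
-- ===== SOURCE A (Python) =====
-- MOD = 998244353
--
-- def solve(N):
--     count = [0] * (N + 1)
--     for i in range(1, N + 1):
--         for j in range(i, N + 1, i):
--             count[j] += 1
--     ans = 0
--     for i in range(1, N + 1):
--         ans += count[i] * count[i] * count[i]
--         ans %= MOD
--     return ans
-- ===== SOURCE B (Python) =====
-- MOD = 998244353
--
-- def solve(N):
--     # Divisor-pair sieve: enumerate only divisor candidates i <= sqrt(N); each such
--     # i credits two to every multiple j above i*i (pairing i with j//i), one to i*i.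
--     count = [0] * (N + 1)
--     i = 1
--     while i * i <= N:
--         count[i * i] += 1
--         for j in range(i * i + i, N + 1, i):
--             count[j] += 2
--         i += 1
--     ans = 0
--     for c in count[1:]:
--         ans = (ans + c * c * c) % MOD
--     return ans
-- ===== Notes on version B (the rewrite author's own statement) =====
-- stated objective: faster
-- what changed: Instead of looping every i from one..N over all its multiples, B enumerates only divisor candidates i up to sqrt(N), crediting two to each multiple above i*i (for the divisor pair i, j//i) and one to the square i*i itself, roughly halving the sieve work.
import Mathlib
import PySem

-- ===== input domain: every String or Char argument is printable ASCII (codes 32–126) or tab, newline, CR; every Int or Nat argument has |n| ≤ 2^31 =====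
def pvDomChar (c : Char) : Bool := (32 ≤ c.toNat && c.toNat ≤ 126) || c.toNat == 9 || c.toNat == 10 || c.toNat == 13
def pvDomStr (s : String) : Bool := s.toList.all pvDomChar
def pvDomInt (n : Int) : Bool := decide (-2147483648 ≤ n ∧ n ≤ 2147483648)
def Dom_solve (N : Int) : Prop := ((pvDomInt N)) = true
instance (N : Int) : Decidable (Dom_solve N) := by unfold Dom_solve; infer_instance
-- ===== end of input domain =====

-- B is a divisor-pair sieve (only i ≤ √N, +2 per multiple above i², +1 at i²); same result, about half the sieve iterations.

def MOD : Int := 998244353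

-- ===== PORT A =====
-- literal port of A: harmonic sieve count[j] += 1 for every multiple j of every i in 1..N,
-- then sum of cubes mod MOD.  All indices j satisfy 1 ≤ j ≤ N < len(count), so
-- pyGetD/pySetD are exact (Python never raises here).
def solve (N : Int) : Int :=
  let count0 : List Int := List.replicate (N + 1).toNat 0
  let count := (PySem.List.pyRange 1 (N + 1)).foldl
    (fun count i =>
      (PySem.List.pyRange i (N + 1) i).foldl
        (fun c j => PySem.List.pySetD c j (PySem.List.pyGetD c j 0 + 1)) count)
    count0
  (PySem.List.pyRange 1 (N + 1)).foldl
    (fun ans i =>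
      PySem.Int.mod
        (ans + PySem.List.pyGetD count i 0 * PySem.List.pyGetD count i 0 *
            PySem.List.pyGetD count i 0) MOD)
    0

-- ===== PORT B =====
-- 'while i * i <= N' loop of Source B; terminates since i*i ≤ N forces i ≤ N.
def sieveLoop (N : Int) (i : Int) (c : List Int) : List Int :=
  if h : i * i ≤ N then
    let c1 := PySem.List.pySetD c (i * i) (PySem.List.pyGetD c (i * i) 0 + 1)
    let c2 := (PySem.List.pyRange (i * i + i) (N + 1) i).foldl
      (fun c j => PySem.List.pySetD c j (PySem.List.pyGetD c j 0 + 2)) c1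
    sieveLoop N (i + 1) c2
  else c
termination_by (N + 1 - i).toNat
decreasing_by
  have hN : 0 ≤ N := le_trans (mul_self_nonneg i) h
  have h2 : 2 * i ≤ N + 1 := by nlinarith [sq_nonneg (i - 1)]
  omega

def solve_alt (N : Int) : Int :=
  let count0 : List Int := List.replicate (N + 1).toNat 0
  let count := sieveLoop N 1 count0
  (PySem.List.slice count (some 1) none).foldl
    (fun ans c => PySem.Int.mod (ans + c * c * c) MOD) 0

-- ===== PRECONDITION & SPEC =====
def Spec_solve (N : Int) (out : Int) : Prop := out = solve_alt N
instance (N : Int) (out : Int) : Decidable (Spec_solve N out) := by unfold Spec_solve; infer_instance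

-- ===== CLAIM (what is proved, stated in full; the proofs are below) =====
def Claim_equal_solve : Prop := ∀ (N : Int), Dom_solve N → Spec_solve N (solve N)

-- ===== LEMMAS AND PROOFS =====

-- per-i contribution of A's sieve to index k
def contribA (N i k : Int) : Int := if i ∣ k ∧ i ≤ k ∧ k ≤ N then 1 else 0
-- per-i contribution of B's sieve to index k
def contribB (N i k : Int) : Int :=
  (if k = i * i then 1 else 0) + (if i ∣ k ∧ i * i < k ∧ k ≤ N then 2 else 0)

theorem length_pySetD {α : Type} (c : List α) (j : Int) (v : α) :
    (PySem.List.pySetD c j v).length = c.length := by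
  unfold PySem.List.pySetD PySem.List.pySet? PySem.List.pyIdx?
  split_ifs <;> simp

theorem pyGetD_pySetD (c : List Int) (j v k : Int) (hj0 : 0 ≤ j)
    (hj : j < (c.length : Int)) (hk : 0 ≤ k) :
    PySem.List.pyGetD (PySem.List.pySetD c j v) k 0 =
      if k = j then v else PySem.List.pyGetD c k 0 := by
  unfold PySem.List.pySetD PySem.List.pySet? PySem.List.pyGetD PySem.List.pyGet? PySem.List.pyIdx?
  simp only [if_pos hj0, if_pos hj, Option.map_some, Option.getD_some, List.length_set, if_pos hk]
  by_cases hkl : k < (c.length : Int)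
  · simp only [if_pos hkl, Option.bind_some, List.getElem?_set]
    by_cases hkj : k = j
    · subst hkj
      have hlt : k.toNat < c.length := by omega
      simp [hlt]
    · have : j.toNat ≠ k.toNat := by omega
      simp [this, hkj]
  · simp only [if_neg hkl]
    have hkj : ¬ (k = j) := by omega
    simp [hkj]

theorem length_foldl_incr (amt : Int) (idxs : List Int) (c : List Int) :
    (idxs.foldl (fun c j => PySem.List.pySetD c j (PySem.List.pyGetD c j 0 + amt)) c).length
      = c.length := by
  induction idxs generalizing c with
  | nil => rfl
  | cons j t ih => simp [List.foldl_cons, ih]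

theorem pyGetD_foldl_incr (amt : Int) (idxs : List Int) (c : List Int) (k : Int)
    (hnd : idxs.Nodup) (hmem : ∀ j ∈ idxs, 0 ≤ j ∧ j < (c.length : Int)) (hk : 0 ≤ k) :
    PySem.List.pyGetD
      (idxs.foldl (fun c j => PySem.List.pySetD c j (PySem.List.pyGetD c j 0 + amt)) c) k 0
      = PySem.List.pyGetD c k 0 + (if k ∈ idxs then amt else 0) := by
  induction idxs generalizing c with
  | nil => simp
  | cons j t ih =>
    obtain ⟨hj0, hjl⟩ := hmem j (by simp)
    obtain ⟨hjt, hnd'⟩ := List.nodup_cons.mp hnd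
    rw [List.foldl_cons,
      ih _ hnd' (fun x hx => by
        simpa [length_pySetD] using hmem x (List.mem_cons_of_mem _ hx)),
      pyGetD_pySetD c j _ k hj0 hjl hk]
    by_cases hkj : k = j
    · subst hkj
      simp [hjt]
    · simp [hkj, List.mem_cons]

theorem nodup_pyRange_pos (a b s : Int) (hs : 0 < s) : (PySem.List.pyRange a b s).Nodup := by
  rw [PySem.List.pyRange_of_pos a b hs]
  refine (List.nodup_range).map ?_
  intro x y hxy
  exact_mod_cast mul_left_cancel₀ (ne_of_gt hs) (add_left_cancel hxy)

-- A's inner loop: contribution to index k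
theorem innerA_getD (N i : Int) (c : List Int) (k : Int) (hi : 1 ≤ i)
    (hlen : c.length = (N + 1).toNat) (hk : 0 ≤ k) :
    PySem.List.pyGetD
      ((PySem.List.pyRange i (N + 1) i).foldl
        (fun c j => PySem.List.pySetD c j (PySem.List.pyGetD c j 0 + 1)) c) k 0
      = PySem.List.pyGetD c k 0 + contribA N i k := by
  have hi0 : (0 : Int) < i := by omega
  rw [pyGetD_foldl_incr 1 _ c k (nodup_pyRange_pos _ _ _ hi0)
    (fun j hj => by
      obtain ⟨h1, h2, -⟩ := (PySem.List.mem_pyRange_iff_of_pos hi0 j).mp hj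
      constructor <;> omega) hk]
  have hiff : (k ∈ PySem.List.pyRange i (N + 1) i) ↔ (i ∣ k ∧ i ≤ k ∧ k ≤ N) := by
    rw [PySem.List.mem_pyRange_iff_of_pos hi0]
    constructor
    · rintro ⟨h1, h2, h3⟩
      refine ⟨?_, h1, by omega⟩
      have := dvd_add h3 (dvd_refl i)
      simpa using this
    · rintro ⟨h1, h2, h3⟩
      exact ⟨h2, by omega, dvd_sub h1 (dvd_refl i)⟩
  rw [contribA, if_congr hiff rfl rfl]

theorem outerA_getD (N : Int) (P : List Int) (c : List Int) (k : Int)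
    (hP : ∀ i ∈ P, 1 ≤ i) (hlen : c.length = (N + 1).toNat) (hk : 0 ≤ k) :
    PySem.List.pyGetD
      (P.foldl (fun count i =>
        (PySem.List.pyRange i (N + 1) i).foldl
          (fun c j => PySem.List.pySetD c j (PySem.List.pyGetD c j 0 + 1)) count) c) k 0
      = PySem.List.pyGetD c k 0 + (P.map (fun i => contribA N i k)).sum := by
  induction P generalizing c with
  | nil => simp
  | cons i t ih =>
    rw [List.foldl_cons, ih _ (fun x hx => hP x (List.mem_cons_of_mem _ hx))
        (by rw [length_foldl_incr]; exact hlen),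
      innerA_getD N i c k (hP i (by simp)) hlen hk, List.map_cons, List.sum_cons]
    ring

-- B's loop body: contribution to index k
theorem stepB_getD (N i : Int) (c : List Int) (k : Int) (hi : 1 ≤ i) (hiN : i * i ≤ N)
    (hlen : c.length = (N + 1).toNat) (hk : 0 ≤ k) :
    PySem.List.pyGetD
      ((PySem.List.pyRange (i * i + i) (N + 1) i).foldl
        (fun c j => PySem.List.pySetD c j (PySem.List.pyGetD c j 0 + 2))
        (PySem.List.pySetD c (i * i) (PySem.List.pyGetD c (i * i) 0 + 1))) k 0
      = PySem.List.pyGetD c k 0 + contribB N i k := by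
  have hi0 : (0 : Int) < i := by omega
  have hii : (0 : Int) ≤ i * i := mul_self_nonneg i
  have hcast : (N : Int) + 1 ≤ ((N + 1).toNat : Int) := by omega
  rw [pyGetD_foldl_incr 2 _ _ k (nodup_pyRange_pos _ _ _ hi0)
    (fun j hj => by
      obtain ⟨h1, h2, -⟩ := (PySem.List.mem_pyRange_iff_of_pos hi0 j).mp hj
      rw [length_pySetD, hlen]
      constructor <;> omega) hk]
  rw [pyGetD_pySetD c (i * i) _ k hii (by rw [hlen]; omega) hk]
  have hiff : (k ∈ PySem.List.pyRange (i * i + i) (N + 1) i) ↔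
      (i ∣ k ∧ i * i < k ∧ k ≤ N) := by
    rw [PySem.List.mem_pyRange_iff_of_pos hi0]
    constructor
    · rintro ⟨h1, h2, h3⟩
      refine ⟨?_, by omega, by omega⟩
      have hd : i ∣ (i * i + i) := ⟨i + 1, by ring⟩
      have := dvd_add h3 hd
      simpa using this
    · rintro ⟨hd, hlt, hle⟩
      have hd2 : i ∣ k - i * i := dvd_sub hd ⟨i, rfl⟩
      have hge : i ≤ k - i * i := Int.le_of_dvd (by omega) hd2
      exact ⟨by omega, by omega, dvd_sub hd ⟨i + 1, by ring⟩⟩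
  rw [if_congr hiff rfl rfl, contribB]
  by_cases h1 : k = i * i
  · subst h1
    simp
  · simp only [if_neg h1]
    ring

theorem sieveLoop_getD (N : Int) (k : Int) (hk : 0 ≤ k) :
    ∀ (i : Int) (c : List Int), 1 ≤ i → c.length = (N + 1).toNat →
    PySem.List.pyGetD (sieveLoop N i c) k 0
      = PySem.List.pyGetD c k 0 +
        (((PySem.List.pyRange i (N + 1)).filter (fun t => decide (t * t ≤ N))).map
          (fun t => contribB N t k)).sum := by
  intro i c
  induction i, c using sieveLoop.induct (N := N) with
  | case1 i c h c1 c2 ih =>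
    intro hi hlen
    rw [sieveLoop, dif_pos h]
    have hiN : i ≤ N := by nlinarith [sq_nonneg (i - 1)]
    rw [ih (by omega) (by rw [length_foldl_incr, length_pySetD]; exact hlen),
      stepB_getD N i c k hi h hlen hk,
      PySem.List.pyRange_one_cons (by omega : i < N + 1)]
    simp only [List.filter_cons, decide_eq_true h, if_true, List.map_cons, List.sum_cons]
    ring
  | case2 i c h =>
    intro hi hlen
    rw [sieveLoop, dif_neg h]
    have hnil : ((PySem.List.pyRange i (N + 1)).filter (fun t => decide (t * t ≤ N))) = [] := by
      refine List.filter_eq_nil_iff.mpr (fun t ht => ?_)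
      obtain ⟨h1, h2⟩ := PySem.List.mem_pyRange_one.mp ht
      simp only [decide_eq_true_eq]
      intro hc
      exact h (le_trans (by nlinarith : i * i ≤ t * t) hc)
    rw [hnil]
    simp

theorem sum_map_pyRange_toFinset (a b : Int) (f : Int → Int) :
    ((PySem.List.pyRange a b).map f).sum = ∑ x ∈ Finset.Ico a b, f x := by
  rw [← List.sum_toFinset f (PySem.List.nodup_pyRange_one a b)]
  congr 1
  ext x
  simp [PySem.List.mem_pyRange_one]

theorem sum_map_filter_pyRange_toFinset (a b : Int) (p : Int → Prop) [DecidablePred p]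
    (f : Int → Int) :
    (((PySem.List.pyRange a b).filter (fun t => decide (p t))).map f).sum
      = ∑ x ∈ (Finset.Ico a b).filter p, f x := by
  rw [← List.sum_toFinset f ((PySem.List.nodup_pyRange_one a b).filter _)]
  congr 1
  ext x
  simp [PySem.List.mem_pyRange_one]

-- the divisor-pairing identity behind the speed-up: pairing d ↦ k/d matches
-- divisors above √k with divisors below √k
theorem card_gt_eq_card_lt (k : Int) (h1 : 1 ≤ k) :
    (((Finset.Ico 1 (k + 1)).filter (· ∣ k)).filter (fun t => k < t * t)).card
      = (((Finset.Ico 1 (k + 1)).filter (· ∣ k)).filter (fun t => t * t < k)).card := by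
  apply Finset.card_bij' (fun t _ => k / t) (fun t _ => k / t)
  · intro t ht
    simp only [Finset.mem_filter, Finset.mem_Ico] at ht ⊢
    obtain ⟨⟨⟨ht1, ht2⟩, hd⟩, hgt⟩ := ht
    have hq : t * (k / t) = k := Int.mul_ediv_cancel' hd
    have hq1 : 1 ≤ k / t := by nlinarith
    have hqk : k / t ≤ k := Int.le_of_dvd h1 ⟨t, by linarith [hq]⟩
    refine ⟨⟨⟨hq1, by omega⟩, ⟨t, by linarith [hq]⟩⟩, by nlinarith⟩
  · intro t ht
    simp only [Finset.mem_filter, Finset.mem_Ico] at ht ⊢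
    obtain ⟨⟨⟨ht1, ht2⟩, hd⟩, hlt⟩ := ht
    have hq : t * (k / t) = k := Int.mul_ediv_cancel' hd
    have hq1 : 1 ≤ k / t := by nlinarith
    have hqk : k / t ≤ k := Int.le_of_dvd h1 ⟨t, by linarith [hq]⟩
    refine ⟨⟨⟨hq1, by omega⟩, ⟨t, by linarith [hq]⟩⟩, by nlinarith⟩
  · intro t ht
    simp only [Finset.mem_filter, Finset.mem_Ico] at ht
    obtain ⟨⟨⟨ht1, ht2⟩, hd⟩, hgt⟩ := ht
    have hq : t * (k / t) = k := Int.mul_ediv_cancel' hd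
    have hq1 : 1 ≤ k / t := by nlinarith
    calc k / (k / t) = (t * (k / t)) / (k / t) := by rw [hq]
      _ = t := Int.mul_ediv_cancel t (by omega)
  · intro t ht
    simp only [Finset.mem_filter, Finset.mem_Ico] at ht
    obtain ⟨⟨⟨ht1, ht2⟩, hd⟩, hlt⟩ := ht
    have hq : t * (k / t) = k := Int.mul_ediv_cancel' hd
    have hq1 : 1 ≤ k / t := by nlinarith
    calc k / (k / t) = (t * (k / t)) / (k / t) := by rw [hq]
      _ = t := Int.mul_ediv_cancel t (by omega)

theorem divisor_pairing (N k : Int) (h1 : 1 ≤ k) (h2 : k ≤ N) :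
    ∑ i ∈ Finset.Ico 1 (N + 1), contribA N i k
      = ∑ t ∈ (Finset.Ico 1 (N + 1)).filter (fun t => t * t ≤ N), contribB N t k := by
  classical
  unfold contribA contribB
  set D := (Finset.Ico 1 (k + 1)).filter (· ∣ k) with hD
  set Dlt := D.filter (fun t => t * t < k) with hDlt
  set Deq := D.filter (fun t => t * t = k) with hDeq
  set Dgt := D.filter (fun t => k < t * t) with hDgt
  have hLHS : ∑ i ∈ Finset.Ico 1 (N + 1), (if i ∣ k ∧ i ≤ k ∧ k ≤ N then (1:Int) else 0)
      = (D.card : Int) := by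
    rw [Finset.sum_boole]
    congr 2
    ext i
    simp only [Finset.mem_filter, Finset.mem_Ico, hD]
    constructor
    · rintro ⟨⟨hi1, -⟩, hd, hik, -⟩
      exact ⟨⟨hi1, by omega⟩, hd⟩
    · rintro ⟨⟨hi1, hi2⟩, hd⟩
      exact ⟨⟨hi1, by omega⟩, hd, by omega, h2⟩
  rw [hLHS, Finset.sum_add_distrib, Finset.sum_boole]
  have h2eq : ∀ t ∈ (Finset.Ico 1 (N + 1)).filter (fun t => t * t ≤ N),
      (if t ∣ k ∧ t * t < k ∧ k ≤ N then (2:Int) else 0)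
        = 2 * (if t ∣ k ∧ t * t < k ∧ k ≤ N then (1:Int) else 0) := by
    intro t _; split_ifs <;> ring
  rw [Finset.sum_congr rfl h2eq, ← Finset.mul_sum, Finset.sum_boole]
  have heq : ((Finset.Ico 1 (N + 1)).filter (fun t => t * t ≤ N)).filter (fun t => k = t * t)
      = Deq := by
    ext t
    simp only [Finset.mem_filter, Finset.mem_Ico, hDeq, hD]
    constructor
    · rintro ⟨⟨⟨ht1, -⟩, -⟩, hk⟩
      exact ⟨⟨⟨ht1, by nlinarith⟩, ⟨t, hk⟩⟩, hk.symm⟩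
    · rintro ⟨⟨⟨ht1, ht2⟩, hd⟩, hk⟩
      have htt : t ≤ t * t := by nlinarith
      exact ⟨⟨⟨ht1, by omega⟩, by omega⟩, hk.symm⟩
  have hlt : ((Finset.Ico 1 (N + 1)).filter (fun t => t * t ≤ N)).filter
      (fun t => t ∣ k ∧ t * t < k ∧ k ≤ N) = Dlt := by
    ext t
    simp only [Finset.mem_filter, Finset.mem_Ico, hDlt, hD]
    constructor
    · rintro ⟨⟨⟨ht1, -⟩, -⟩, hd, hlt', -⟩
      have htk : t ≤ k := Int.le_of_dvd (by omega) hd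
      exact ⟨⟨⟨ht1, by omega⟩, hd⟩, hlt'⟩
    · rintro ⟨⟨⟨ht1, ht2⟩, hd⟩, hlt'⟩
      have htk : t ≤ k := Int.le_of_dvd (by omega) hd
      exact ⟨⟨⟨ht1, by omega⟩, by omega⟩, hd, hlt', h2⟩
  rw [heq, hlt]
  have hpart : (D.card : Int) = Dlt.card + Deq.card + Dgt.card := by
    have : ∀ t ∈ D, (1 : Int)
        = (if t * t < k then (1:Int) else 0) + (if t * t = k then 1 else 0)
          + (if k < t * t then 1 else 0) := by
      intro t _
      rcases lt_trichotomy (t * t) k with h | h | h <;> split_ifs <;> omega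
    calc (D.card : Int) = ∑ _t ∈ D, (1 : Int) := by simp
      _ = ∑ t ∈ D, ((if t * t < k then (1:Int) else 0) + (if t * t = k then 1 else 0)
          + (if k < t * t then 1 else 0)) := Finset.sum_congr rfl this
      _ = Dlt.card + Deq.card + Dgt.card := by
          rw [Finset.sum_add_distrib, Finset.sum_add_distrib, Finset.sum_boole,
            Finset.sum_boole, Finset.sum_boole]
  have hbij : Dgt.card = Dlt.card := card_gt_eq_card_lt k h1
  rw [hpart, hbij]
  ring

-- the divisor-pairing identity: both sieves give the same count at every index
theorem contrib_sum_eq (N k : Int) (hk : 0 ≤ k) :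
    ((PySem.List.pyRange 1 (N + 1)).map (fun i => contribA N i k)).sum
      = (((PySem.List.pyRange 1 (N + 1)).filter (fun t => decide (t * t ≤ N))).map
          (fun t => contribB N t k)).sum := by
  rw [sum_map_pyRange_toFinset,
    sum_map_filter_pyRange_toFinset 1 (N + 1) (fun t => t * t ≤ N) (fun t => contribB N t k)]
  by_cases hmain : 1 ≤ k ∧ k ≤ N
  · exact divisor_pairing N k hmain.1 hmain.2
  · rw [Finset.sum_eq_zero, Finset.sum_eq_zero]
    · intro t ht
      simp only [Finset.mem_filter, Finset.mem_Ico] at ht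
      obtain ⟨⟨ht1, ht2⟩, htN⟩ := ht
      have htt : 1 ≤ t * t := by nlinarith
      unfold contribB
      rw [if_neg (by omega), if_neg (by rintro ⟨-, hlt, hle⟩; omega)]
      simp
    · intro i hi
      obtain ⟨hi1, hi2⟩ := Finset.mem_Ico.mp hi
      unfold contribA
      rw [if_neg (by rintro ⟨-, hik, hkN⟩; omega)]

theorem length_outerA (N : Int) (P : List Int) (c : List Int) :
    (P.foldl (fun count i =>
      (PySem.List.pyRange i (N + 1) i).foldl
        (fun c j => PySem.List.pySetD c j (PySem.List.pyGetD c j 0 + 1)) count) c).length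
      = c.length := by
  induction P generalizing c with
  | nil => rfl
  | cons i t ih => rw [List.foldl_cons, ih, length_foldl_incr]

theorem length_sieveLoop (N : Int) :
    ∀ (i : Int) (c : List Int), (sieveLoop N i c).length = c.length := by
  intro i c
  induction i, c using sieveLoop.induct (N := N) with
  | case1 i c h c1 c2 ih =>
    rw [sieveLoop, dif_pos h, ih, length_foldl_incr, length_pySetD]
  | case2 i c h => rw [sieveLoop, dif_neg h]

theorem counts_eq (N : Int) :
    (PySem.List.pyRange 1 (N + 1)).foldl
      (fun count i =>
        (PySem.List.pyRange i (N + 1) i).foldl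
          (fun c j => PySem.List.pySetD c j (PySem.List.pyGetD c j 0 + 1)) count)
      (List.replicate (N + 1).toNat 0)
    = sieveLoop N 1 (List.replicate (N + 1).toNat (0 : Int)) := by
  apply List.ext_getElem (by rw [length_outerA, length_sieveLoop])
  intro n h1 h2
  have hrep : ∀ m : Int, 0 ≤ m →
      PySem.List.pyGetD (List.replicate (N + 1).toNat (0 : Int)) m 0 = 0 := by
    intro m hm
    have : PySem.List.pyGetD (List.replicate (N + 1).toNat (0 : Int)) m 0
        = (List.replicate (N + 1).toNat (0 : Int)).getD m.toNat 0 := by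
      rw [← PySem.List.pyGetD_natCast (n := m.toNat), Int.toNat_of_nonneg hm]
    rw [this, List.getD_eq_getElem?_getD]
    cases h : (List.replicate (N + 1).toNat (0 : Int))[m.toNat]? with
    | none => rfl
    | some v => simp [List.getElem?_replicate] at h; simp [h.2]
  have hA := outerA_getD N (PySem.List.pyRange 1 (N + 1))
    (List.replicate (N + 1).toNat 0) (n : Int)
    (fun i hi => (PySem.List.mem_pyRange_one.mp hi).1) (by simp) (Int.natCast_nonneg n)
  have hB := sieveLoop_getD N (n : Int) (Int.natCast_nonneg n) 1
    (List.replicate (N + 1).toNat 0) le_rfl (by simp)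
  rw [hrep _ (Int.natCast_nonneg n), zero_add] at hA hB
  rw [PySem.List.pyGetD_natCast] at hA hB
  rw [← List.getD_eq_getElem _ 0 h1, ← List.getD_eq_getElem _ 0 h2, hA, hB]
  exact contrib_sum_eq N (n : Int) (Int.natCast_nonneg n)

-- ===== VERDICT (by name: the statement is the Claim_ definition above) =====
theorem solve_spec : Claim_equal_solve := by
  intro N _
  show solve N = solve_alt N
  dsimp only [solve, solve_alt]
  rw [counts_eq N]
  set cnt := sieveLoop N 1 (List.replicate (N + 1).toNat (0 : Int)) with hcnt
  rw [PySem.List.slice_from _ (by norm_num)]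
  by_cases hN : 0 ≤ N
  · have hlen : PySem.List.len cnt = N + 1 := by
      rw [PySem.List.len, hcnt, length_sieveLoop]
      simp
      omega
    rw [show N + 1 = PySem.List.len cnt from hlen.symm,
      PySem.List.foldl_pyRange_pyGetD cnt 0
        (fun acc v => PySem.Int.mod (acc + v * v * v) MOD) 0 (by norm_num)]
  · have hnil : PySem.List.pyRange 1 (N + 1) = [] := PySem.List.pyRange_one_eq_nil (by omega)
    have hcnil : cnt = [] := by
      rw [hcnt, sieveLoop, dif_neg (by nlinarith)]
      simp
      omega
    rw [hnil, hcnil]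
    rfl
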